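-- pv_equiv track=rewrite | github.com/JWeonseok/Problem-Solving | Programmers/DP/DP_no.1.py | solution
-- ===== SOURCE A (Python) =====
-- import math
--
-- def solution(N, number):
--     if N == number:
--         return 1
--     temp = [[N]]
--     for j in range(2, 9):
--         r = []
--         for i in range(math.ceil(len(temp)/2)):
--             tmp1 = temp[i]
--             tmp2 = temp[-(i+1)]
--             for e1 in tmp1:
--                 for e2 in tmp2:
--                     if e1 + e2 == number:
--                         return j
--                     elif e1 + e2 not in r:
--                         r.append(e1 + e2)
--                     if e1 - e2 == number:
--                         return j
--                     elif e1 - e2 not in r: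
--                         r.append(e1 - e2)
--                     if e2 - e1 == number:
--                         return j
--                     elif e2 - e1 not in r:
--                         r.append(e2 - e1)
--                     if e1 * e2 == number:
--                         return j
--                     elif e1 * e2 not in r:
--                         r.append(e1 * e2)
--                     if e1 == 0 or e2 == 0:
--                         if 0 not in r:
--                             r.append(0)
--                     elif e1 % e2 == 0:
--                         if int(e1 / e2) == number:
--                             return j
--                         elif int(e1 / e2) not in r:
--                             r.append(int(e1 / e2))
--                     elif e2 % e1 == 0:
--                         if int(e2 / e1) == number:
--                             return j
--                         elif int(e2 / e1) not in r:
--                             r.append(int(e2 / e1))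
--         if int(str(N)*j) == number:
--             return j
--         else:
--             r.append(int(str(N)*j))
--         temp.append(r)
--     return -1
-- ===== SOURCE B (Python) =====
-- def solution(N, number):
--     # Top-down memoized recursion: reach(i) = set of values expressible with
--     # exactly i copies of N; levels are built lazily, only until a hit.
--     memo = {}
--
--     def reach(i):
--         if i in memo:
--             return memo[i]
--         if i == 1:
--             s = {N}
--         else:
--             s = {int(str(N) * i)}
--             for j in range(1, i):
--                 for a in reach(j):
--                     for b in reach(i - j):
--                         s.add(a + b)
--                         s.add(a - b)
--                         s.add(b - a)
--                         s.add(a * b)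
--                         if a == 0 or b == 0:
--                             s.add(0)
--                         elif a % b == 0:
--                             s.add(int(a / b))
--                         elif b % a == 0:
--                             s.add(int(b / a))
--         memo[i] = s
--         return s
--
--     for i in range(1, 9):
--         if number in reach(i):
--             return i
--     return -1
-- ===== Notes on version B (the rewrite author's own statement) =====
-- stated objective: faster
-- what changed: Intended as faster (measured: large speedups / A timeouts on big inputs in some probe runs, unconfirmed in others). B is a top-down memoized recursion reach(i) over hash sets, queried lazily level by level (it stops building as soon as the target level is hit) and combining all ordered splits (j, i-j), replacing A's single interleaved bottom-up loop that pairs levels by negative indexing over half the splits, dedups with O(r) 'not in list' scans and returns from inside the generation loops.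
-- outside the precondition, e.g. on solution(-1, 1): A returns 2, B raises ValueError; on solution(-2, 4): A returns 2, B raises ValueError
import Mathlib
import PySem

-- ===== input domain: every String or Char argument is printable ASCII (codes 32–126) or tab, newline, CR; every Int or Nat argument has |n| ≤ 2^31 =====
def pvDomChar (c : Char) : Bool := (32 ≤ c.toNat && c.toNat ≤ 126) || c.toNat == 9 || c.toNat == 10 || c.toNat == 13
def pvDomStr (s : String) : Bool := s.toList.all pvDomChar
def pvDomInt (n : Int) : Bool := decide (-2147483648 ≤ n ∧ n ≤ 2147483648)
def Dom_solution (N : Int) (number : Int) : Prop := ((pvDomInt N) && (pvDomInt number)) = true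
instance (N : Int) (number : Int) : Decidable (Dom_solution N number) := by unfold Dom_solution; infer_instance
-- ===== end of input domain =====

-- B replaces A's interleaved bottom-up loop (manual 'not in list' dedup, inline early returns,
-- half-split pairing via negative indexing) by a top-down memoized recursion over hash sets,
-- queried lazily level by level; intended as faster (hash-set membership instead of A's O(r)
-- list scans, and levels past the answer are never built) — a timing run measured large
-- speedups on big inputs in some runs (A timing out where B answered) but could not confirm
-- the ratio on every sampled family.

-- ===== PORT A =====
-- Shared arithmetic helpers (both Pythons contain the very same expressions).

-- int(a/b) where b divides a and b ≠ 0 (the only way either Python calls it): Python's a/b is the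
-- true quotient correctly rounded to an IEEE-754 double (round-to-nearest, ties-to-even) and int()
-- truncates; since b ∣ a the true quotient is the exact integer a/b, so the result is that integer
-- rounded to 53 significant bits.  Exact for |quotient| < 2^1024 (no overflow on our inputs).
def pyRound53 (q : Int) : Int :=
  let n := q.natAbs
  if n < 2 ^ 53 then q
  else
    let k := n.log2 - 52          -- significand n / 2^k ∈ [2^52, 2^53)
    let m := n / 2 ^ k
    let rem := n % 2 ^ k
    let half := 2 ^ (k - 1)
    let m' := if half < rem ∨ (rem = half ∧ m % 2 = 1) then m + 1 else m
    if q < 0 then -((m' * 2 ^ k : Nat) : Int) else ((m' * 2 ^ k : Nat) : Int)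

def pyIntTrueDiv (a b : Int) : Int := pyRound53 (a / b)

-- int(str(N)*j); the .getD 0 is unreachable under Pre_solution (0 ≤ N makes the string parse,
-- and with N = number neither program ever evaluates it).
def concatN (N j : Int) : Int :=
  (PySem.Int.ofChars? (PySem.List.pyRepeat (PySem.Int.toChars N) j)).getD 0

-- A's repeated two-line pattern 'if v == number: return j / elif v not in r: r.append(v)';
-- none = 'return j'
def checkAdd (number v : Int) (r : List Int) : Option (List Int) :=
  if v = number then none else some (if v ∈ r then r else r ++ [v])

-- the body of A's innermost loop: one (e1, e2) pair
def comboStep (number : Int) (r : List Int) (e1 e2 : Int) : Option (List Int) :=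
  match checkAdd number (e1 + e2) r with
  | none => none
  | some r =>
    match checkAdd number (e1 - e2) r with
    | none => none
    | some r =>
      match checkAdd number (e2 - e1) r with
      | none => none
      | some r =>
        match checkAdd number (e1 * e2) r with
        | none => none
        | some r =>
          if e1 = 0 ∨ e2 = 0 then some (if (0 : Int) ∈ r then r else r ++ [0])
          else if PySem.Int.mod e1 e2 = 0 then checkAdd number (pyIntTrueDiv e1 e2) r
          else if PySem.Int.mod e2 e1 = 0 then checkAdd number (pyIntTrueDiv e2 e1) r
          else some r

-- 'for e2 in tmp2'
def loopE2 (number e1 : Int) : List Int → List Int → Option (List Int)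
  | [], r => some r
  | e2 :: t, r =>
    match comboStep number r e1 e2 with
    | none => none
    | some r' => loopE2 number e1 t r'

-- 'for e1 in tmp1'
def loopE1 (number : Int) (tmp2 : List Int) : List Int → List Int → Option (List Int)
  | [], r => some r
  | e1 :: t, r =>
    match loopE2 number e1 tmp2 r with
    | none => none
    | some r' => loopE1 number tmp2 t r'

-- 'for i in range(math.ceil(len(temp)/2))'; tmp1 = temp[i], tmp2 = temp[-(i+1)], always in
-- range, so the pyGetD defaults are unreachable
def loopI (number : Int) (temp : List (List Int)) : List Int → List Int → Option (List Int)
  | [], r => some r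
  | i :: t, r =>
    match loopE1 number (PySem.List.pyGetD temp (-(i + 1)) []) (PySem.List.pyGetD temp i []) r with
    | none => none
    | some r' => loopI number temp t r'

-- 'for j in range(2, 9)'; math.ceil(len(temp)/2) = (len(temp)+1)//2 exactly (the float is exact
-- at these sizes)
def loopJ (N number : Int) : List Int → List (List Int) → Int
  | [], _ => -1
  | j :: js, temp =>
    match loopI number temp
        (PySem.List.pyRange 0 (PySem.Int.floordiv (PySem.List.len temp + 1) 2) 1) [] with
    | none => j
    | some r =>
      if concatN N j = number then j
      else loopJ N number js (temp ++ [r ++ [concatN N j]])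

def solution (N : Int) (number : Int) : Int :=
  if N = number then 1
  else loopJ N number (PySem.List.pyRange 2 9 1) [[N]]

-- ===== PORT B =====
-- the body of B's innermost loop: s.add(...) for one (a, b) pair
def addCombos (cur : PySem.Set Int) (x y : Int) : PySem.Set Int :=
  let cur := PySem.Set.add (PySem.Set.add (PySem.Set.add (PySem.Set.add cur (x + y)) (x - y)) (y - x)) (x * y)
  if x = 0 ∨ y = 0 then PySem.Set.add cur 0
  else if PySem.Int.mod x y = 0 then PySem.Set.add cur (pyIntTrueDiv x y)
  else if PySem.Int.mod y x = 0 then PySem.Set.add cur (pyIntTrueDiv y x)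
  else cur

-- B's recursive 'reach(i)'.  B's memo dict only caches the values of this pure recursion; the
-- port is the same recursion without the cache (same sets, recomputed).
def reachB (N : Int) : Nat → PySem.Set Int
  | 0 => PySem.Set.ofList []          -- unreachable: reach is only called with i ≥ 1
  | 1 => PySem.Set.ofList [N]
  | (i + 2) =>
    (List.range' 1 (i + 1)).attach.foldl
      (fun s j =>
        (reachB N j.1).foldl
          (fun s x => (reachB N (i + 2 - j.1)).foldl (fun s y => addCombos s x y) s)
          s)
      (PySem.Set.ofList [concatN N ((i : Int) + 2)])
  termination_by i => i
  decreasing_by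
  · have h := j.2; rw [List.mem_range'_1] at h; omega
  · have h := j.2; rw [List.mem_range'_1] at h; omega

-- 'for i in range(1, 9): if number in reach(i): return i'
def scanAlt (N number : Int) : List Nat → Int
  | [] => -1
  | i :: t => if PySem.Set.contains (reachB N i) number then (i : Int) else scanAlt N number t

def solution_alt (N : Int) (number : Int) : Int :=
  scanAlt N number (List.range' 1 8)

-- ===== PRECONDITION & SPEC =====
-- Pre_ excludes N < 0 except when N = number: for N < 0 the string str(N)*i (i ≥ 2) is not a
-- number, so B raises ValueError on int(str(N)*i) (and A raises too unless an inline early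
-- return fires first); for N = number both return 1 before any concatenation.
def Pre_solution (N : Int) (number : Int) : Prop := 0 ≤ N ∨ N = number
instance (N : Int) (number : Int) : Decidable (Pre_solution N number) := by
  unfold Pre_solution; infer_instance
def pvWitness_solution : Int × Int := (5, 26)

def Spec_solution (N : Int) (number : Int) (out : Int) : Prop := out = solution_alt N number
instance (N : Int) (number : Int) (out : Int) : Decidable (Spec_solution N number out) := by
  unfold Spec_solution; infer_instance

-- ===== CLAIM (what is proved, stated in full; the proofs are below) =====
def Claim_equal_solution : Prop := ∀ (N : Int) (number : Int), Dom_solution N number →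
  Pre_solution N number → Spec_solution N number (solution N number)

-- ===== LEMMAS AND PROOFS =====

-- the set of values A appends / B adds for one pair (x, y)
def divVals (x y : Int) : List Int :=
  if x = 0 ∨ y = 0 then [0]
  else if PySem.Int.mod x y = 0 then [pyIntTrueDiv x y]
  else if PySem.Int.mod y x = 0 then [pyIntTrueDiv y x]
  else []

def combos (x y : Int) : List Int := [x + y, x - y, y - x, x * y] ++ divVals x y

def PairHit (xs ys : List Int) (v : Int) : Prop := ∃ x ∈ xs, ∃ y ∈ ys, v ∈ combos x y

-- ---- A side ----
lemma checkAdd_none_iff (number v : Int) (r : List Int) :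
    checkAdd number v r = none ↔ v = number := by
  unfold checkAdd; split_ifs <;> simp_all

lemma checkAdd_some_mem (number v : Int) (r r' : List Int)
    (h : checkAdd number v r = some r') (w : Int) : w ∈ r' ↔ w ∈ r ∨ w = v := by
  unfold checkAdd at h
  split_ifs at h with h1 h2 <;> simp_all <;> aesop

lemma comboStep_none_iff (number : Int) (r : List Int) (e1 e2 : Int) :
    comboStep number r e1 e2 = none ↔ number ∈ combos e1 e2 := by
  unfold comboStep
  simp only [combos, divVals, List.mem_append, List.mem_cons,
    List.not_mem_nil]
  cases h1 : checkAdd number (e1 + e2) r with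
  | none => rw [checkAdd_none_iff] at h1; simp [h1]
  | some r1 =>
    dsimp only
    have m1 : number ≠ e1 + e2 := by intro hq; rw [← hq] at h1; simp [checkAdd] at h1
    cases h2 : checkAdd number (e1 - e2) r1 with
    | none => rw [checkAdd_none_iff] at h2; simp [h2]
    | some r2 =>
      dsimp only
      have m2 : number ≠ e1 - e2 := by intro hq; rw [← hq] at h2; simp [checkAdd] at h2
      cases h3 : checkAdd number (e2 - e1) r2 with
      | none => rw [checkAdd_none_iff] at h3; simp [h3]
      | some r3 =>
        dsimp only
        have m3 : number ≠ e2 - e1 := by intro hq; rw [← hq] at h3; simp [checkAdd] at h3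
        cases h4 : checkAdd number (e1 * e2) r3 with
        | none => rw [checkAdd_none_iff] at h4; simp [h4]
        | some r4 =>
          dsimp only
          have m4 : number ≠ e1 * e2 := by intro hq; rw [← hq] at h4; simp [checkAdd] at h4
          by_cases hz : e1 = 0 ∨ e2 = 0
          · have hz0 : e1 * e2 = 0 := by rcases hz with h | h <;> simp [h]
            have m0 : number ≠ 0 := fun h => m4 (by rw [h, hz0])
            simp [hz, m1, m2, m3, m4, m0]
          · by_cases hd1 : PySem.Int.mod e1 e2 = 0
            · simp [hz, hd1, checkAdd_none_iff, m1, m2, m3, m4, eq_comm]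
            · by_cases hd2 : PySem.Int.mod e2 e1 = 0
              · simp [hz, hd1, hd2, checkAdd_none_iff, m1, m2, m3, m4, eq_comm]
              · simp [hz, hd1, hd2, m1, m2, m3, m4]

lemma comboStep_some_mem (number : Int) (r r' : List Int) (e1 e2 : Int)
    (h : comboStep number r e1 e2 = some r') (v : Int) :
    v ∈ r' ↔ v ∈ r ∨ v ∈ combos e1 e2 := by
  unfold comboStep at h
  simp only [combos, divVals, List.mem_append, List.mem_cons,
    List.not_mem_nil]
  cases h1 : checkAdd number (e1 + e2) r with
  | none => rw [h1] at h; simp at h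
  | some r1 =>
    rw [h1] at h; dsimp only at h
    have k1 := checkAdd_some_mem number (e1 + e2) r r1 h1
    cases h2 : checkAdd number (e1 - e2) r1 with
    | none => rw [h2] at h; simp at h
    | some r2 =>
      rw [h2] at h; dsimp only at h
      have k2 := checkAdd_some_mem number (e1 - e2) r1 r2 h2
      cases h3 : checkAdd number (e2 - e1) r2 with
      | none => rw [h3] at h; simp at h
      | some r3 =>
        rw [h3] at h; dsimp only at h
        have k3 := checkAdd_some_mem number (e2 - e1) r2 r3 h3
        cases h4 : checkAdd number (e1 * e2) r3 with
        | none => rw [h4] at h; simp at h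
        | some r4 =>
          rw [h4] at h; dsimp only at h
          have k4 := checkAdd_some_mem number (e1 * e2) r3 r4 h4
          by_cases hz : e1 = 0 ∨ e2 = 0
          · simp only [if_pos hz] at h
            have hz0 : e1 * e2 = 0 := by rcases hz with hh | hh <;> simp [hh]
            have := Option.some.inj h
            subst this
            by_cases h0 : (0 : Int) ∈ r4 <;>
              simp [h0, hz, k4, k3, k2, k1, hz0] <;> aesop
          · simp only [if_neg hz] at h
            by_cases hd1 : PySem.Int.mod e1 e2 = 0
            · simp only [if_pos hd1] at h
              have k5 := checkAdd_some_mem number (pyIntTrueDiv e1 e2) r4 r' h v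
              simp [hz, hd1, k5, k4, k3, k2, k1]
              tauto
            · simp only [if_neg hd1] at h
              by_cases hd2 : PySem.Int.mod e2 e1 = 0
              · simp only [if_pos hd2] at h
                have k5 := checkAdd_some_mem number (pyIntTrueDiv e2 e1) r4 r' h v
                simp [hz, hd1, hd2, k5, k4, k3, k2, k1]
                tauto
              · simp only [if_neg hd2] at h
                have := Option.some.inj h
                subst this
                simp [hz, hd1, hd2, k4, k3, k2, k1]
                tauto

lemma loopE2_none_iff (number e1 : Int) (ys r : List Int) :
    loopE2 number e1 ys r = none ↔ ∃ y ∈ ys, number ∈ combos e1 y := by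
  induction ys generalizing r with
  | nil => simp [loopE2]
  | cons y t ih =>
    unfold loopE2
    cases hc : comboStep number r e1 y with
    | none =>
      rw [comboStep_none_iff] at hc
      simp only [List.mem_cons]
      exact iff_of_true trivial ⟨y, Or.inl rfl, hc⟩
    | some r1 =>
      have hnc : number ∉ combos e1 y := by
        rw [← comboStep_none_iff number r e1 y]; simp [hc]
      simp only [List.mem_cons, ih]
      constructor
      · rintro ⟨y', hy', hv⟩; exact ⟨y', Or.inr hy', hv⟩
      · rintro ⟨y', hy', hv⟩
        rcases hy' with rfl | hy'
        · exact absurd hv hnc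
        · exact ⟨y', hy', hv⟩

lemma loopE2_some_mem (number e1 : Int) (ys r r' : List Int)
    (h : loopE2 number e1 ys r = some r') (v : Int) :
    v ∈ r' ↔ v ∈ r ∨ ∃ y ∈ ys, v ∈ combos e1 y := by
  induction ys generalizing r with
  | nil => simp [loopE2] at h; subst h; simp
  | cons y t ih =>
    unfold loopE2 at h
    cases hc : comboStep number r e1 y with
    | none => rw [hc] at h; simp at h
    | some r1 =>
      rw [hc] at h; dsimp only at h
      have k := comboStep_some_mem number r r1 e1 y hc v
      rw [ih r1 h, k]
      simp only [List.mem_cons]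
      constructor
      · rintro ((hv | hv) | ⟨y', hy', hv⟩)
        · exact Or.inl hv
        · exact Or.inr ⟨y, Or.inl rfl, hv⟩
        · exact Or.inr ⟨y', Or.inr hy', hv⟩
      · rintro (hv | ⟨y', rfl | hy', hv⟩)
        · exact Or.inl (Or.inl hv)
        · exact Or.inl (Or.inr hv)
        · exact Or.inr ⟨y', hy', hv⟩

lemma loopE1_none_iff (number : Int) (tmp2 xs r : List Int) :
    loopE1 number tmp2 xs r = none ↔ PairHit xs tmp2 number := by
  induction xs generalizing r with
  | nil => simp [loopE1, PairHit]
  | cons x t ih =>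
    unfold loopE1
    cases hc : loopE2 number x tmp2 r with
    | none =>
      rw [loopE2_none_iff] at hc
      obtain ⟨y, hy, hv⟩ := hc
      exact iff_of_true rfl ⟨x, List.mem_cons_self .., y, hy, hv⟩
    | some r1 =>
      have hnc : ¬ ∃ y ∈ tmp2, number ∈ combos x y := by
        rw [← loopE2_none_iff number x tmp2 r]; simp [hc]
      simp only [PairHit, List.mem_cons] at *
      rw [ih r1]
      constructor
      · rintro ⟨x', hx', hv⟩; exact ⟨x', Or.inr hx', hv⟩
      · rintro ⟨x', rfl | hx', hv⟩
        · exact absurd hv hnc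
        · exact ⟨x', hx', hv⟩

lemma loopE1_some_mem (number : Int) (tmp2 xs r r' : List Int)
    (h : loopE1 number tmp2 xs r = some r') (v : Int) :
    v ∈ r' ↔ v ∈ r ∨ PairHit xs tmp2 v := by
  induction xs generalizing r with
  | nil => simp [loopE1] at h; subst h; simp [PairHit]
  | cons x t ih =>
    unfold loopE1 at h
    cases hc : loopE2 number x tmp2 r with
    | none => rw [hc] at h; simp at h
    | some r1 =>
      rw [hc] at h; dsimp only at h
      have k := loopE2_some_mem number x tmp2 r r1 hc v
      rw [ih r1 h, k]
      simp only [PairHit, List.mem_cons]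
      constructor
      · rintro ((hv | ⟨y, hy, hv⟩) | ⟨x', hx', y, hy, hv⟩)
        · exact Or.inl hv
        · exact Or.inr ⟨x, Or.inl rfl, y, hy, hv⟩
        · exact Or.inr ⟨x', Or.inr hx', y, hy, hv⟩
      · rintro (hv | ⟨x', rfl | hx', y, hy, hv⟩)
        · exact Or.inl (Or.inl hv)
        · exact Or.inl (Or.inr ⟨y, hy, hv⟩)
        · exact Or.inr ⟨x', hx', y, hy, hv⟩

def IHit (temp : List (List Int)) (is : List Int) (v : Int) : Prop :=
  ∃ i ∈ is, PairHit (PySem.List.pyGetD temp i []) (PySem.List.pyGetD temp (-(i + 1)) []) v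

lemma loopI_none_iff (number : Int) (temp : List (List Int)) (is r : List Int) :
    loopI number temp is r = none ↔ IHit temp is number := by
  induction is generalizing r with
  | nil => simp [loopI, IHit]
  | cons i t ih =>
    unfold loopI
    cases hc : loopE1 number (PySem.List.pyGetD temp (-(i + 1)) [])
        (PySem.List.pyGetD temp i []) r with
    | none =>
      rw [loopE1_none_iff] at hc
      exact iff_of_true rfl ⟨i, List.mem_cons_self .., hc⟩
    | some r1 =>
      have hnc : ¬ PairHit (PySem.List.pyGetD temp i [])
          (PySem.List.pyGetD temp (-(i + 1)) []) number := by
        intro hp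
        rw [← loopE1_none_iff number _ _ r, hc] at hp
        exact absurd hp (by simp)
      simp only [IHit, List.mem_cons]
      rw [ih r1]
      constructor
      · rintro ⟨i', hi', hv⟩; exact ⟨i', Or.inr hi', hv⟩
      · rintro ⟨i', rfl | hi', hv⟩
        · exact absurd hv hnc
        · exact ⟨i', hi', hv⟩

lemma loopI_some_mem (number : Int) (temp : List (List Int)) (is r r' : List Int)
    (h : loopI number temp is r = some r') (v : Int) :
    v ∈ r' ↔ v ∈ r ∨ IHit temp is v := by
  induction is generalizing r with
  | nil => simp [loopI] at h; subst h; simp [IHit]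
  | cons i t ih =>
    unfold loopI at h
    cases hc : loopE1 number (PySem.List.pyGetD temp (-(i + 1)) [])
        (PySem.List.pyGetD temp i []) r with
    | none => rw [hc] at h; simp at h
    | some r1 =>
      rw [hc] at h; dsimp only at h
      have k := loopE1_some_mem number _ _ r r1 hc v
      rw [ih r1 h, k]
      simp only [IHit, List.mem_cons]
      constructor
      · rintro ((hv | hv) | ⟨i', hi', hv⟩)
        · exact Or.inl hv
        · exact Or.inr ⟨i, Or.inl rfl, hv⟩
        · exact Or.inr ⟨i', Or.inr hi', hv⟩
      · rintro (hv | ⟨i', rfl | hi', hv⟩)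
        · exact Or.inl (Or.inl hv)
        · exact Or.inl (Or.inr hv)
        · exact Or.inr ⟨i', hi', hv⟩

-- ---- symmetry of one pair's combo set (bridges A's half splits to B's full splits) ----
lemma tdiv_symm (x y : Int) (hx : x ≠ 0) (hy : y ≠ 0) (h1 : y ∣ x) (h2 : x ∣ y) :
    pyIntTrueDiv x y = pyIntTrueDiv y x := by
  have habs : x.natAbs = y.natAbs :=
    Nat.dvd_antisymm (Int.natAbs_dvd_natAbs.mpr h2) (Int.natAbs_dvd_natAbs.mpr h1)
  rcases Int.natAbs_eq_natAbs_iff.mp habs with rfl | rfl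
  · rfl
  · unfold pyIntTrueDiv
    rw [Int.neg_ediv_of_dvd (dvd_refl y), Int.ediv_neg]

lemma divVals_symm (x y : Int) : divVals x y = divVals y x := by
  unfold divVals
  rcases eq_or_ne x 0 with rfl | hx
  · simp
  · rcases eq_or_ne y 0 with rfl | hy
    · simp
    · rw [if_neg (show ¬(x = 0 ∨ y = 0) by tauto), if_neg (show ¬(y = 0 ∨ x = 0) by tauto)]
      by_cases h1 : PySem.Int.mod x y = 0 <;> by_cases h2 : PySem.Int.mod y x = 0
      · have d1 := (PySem.Int.mod_eq_zero_iff_dvd x y).mp h1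
        have d2 := (PySem.Int.mod_eq_zero_iff_dvd y x).mp h2
        simp [h1, h2, tdiv_symm x y hx hy d1 d2]
      · simp [h1, h2]
      · simp [h1, h2]
      · simp [h1, h2]

lemma combos_symm (x y v : Int) : v ∈ combos x y ↔ v ∈ combos y x := by
  unfold combos
  rw [divVals_symm, show x + y = y + x from add_comm x y, show x * y = y * x from mul_comm x y]
  simp only [List.mem_append, List.mem_cons]
  tauto

lemma PairHit_swap (xs ys : List Int) (v : Int) : PairHit xs ys v ↔ PairHit ys xs v := by
  unfold PairHit
  constructor
  · rintro ⟨a, ha, b, hb, hv⟩; exact ⟨b, hb, a, ha, (combos_symm a b v).mp hv⟩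
  · rintro ⟨a, ha, b, hb, hv⟩; exact ⟨b, hb, a, ha, (combos_symm a b v).mp hv⟩

-- ---- B side ----
lemma addCombos_mem (cur : PySem.Set Int) (x y v : Int) :
    v ∈ addCombos cur x y ↔ v ∈ cur ∨ v ∈ combos x y := by
  unfold addCombos combos divVals
  split_ifs <;> simp [PySem.Set.mem_add] <;> tauto

lemma foldY_mem (ys : List Int) (x : Int) (cur : PySem.Set Int) (v : Int) :
    v ∈ ys.foldl (fun c y => addCombos c x y) cur ↔ v ∈ cur ∨ ∃ y ∈ ys, v ∈ combos x y := by
  induction ys generalizing cur with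
  | nil => simp
  | cons y t ih =>
    simp only [List.foldl_cons, ih, addCombos_mem, List.mem_cons]
    constructor
    · rintro ((hv | hv) | ⟨y', hy', hv⟩)
      · exact Or.inl hv
      · exact Or.inr ⟨y, Or.inl rfl, hv⟩
      · exact Or.inr ⟨y', Or.inr hy', hv⟩
    · rintro (hv | ⟨y', rfl | hy', hv⟩)
      · exact Or.inl (Or.inl hv)
      · exact Or.inl (Or.inr hv)
      · exact Or.inr ⟨y', hy', hv⟩

lemma foldX_mem (xs ys : List Int) (cur : PySem.Set Int) (v : Int) :
    v ∈ xs.foldl (fun c x => ys.foldl (fun c y => addCombos c x y) c) cur ↔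
      v ∈ cur ∨ PairHit xs ys v := by
  induction xs generalizing cur with
  | nil => simp [PairHit]
  | cons x t ih =>
    simp only [List.foldl_cons, ih, foldY_mem, PairHit, List.mem_cons]
    constructor
    · rintro ((hv | ⟨y, hy, hv⟩) | ⟨x', hx', y, hy, hv⟩)
      · exact Or.inl hv
      · exact Or.inr ⟨x, Or.inl rfl, y, hy, hv⟩
      · exact Or.inr ⟨x', Or.inr hx', y, hy, hv⟩
    · rintro (hv | ⟨x', rfl | hx', y, hy, hv⟩)
      · exact Or.inl (Or.inl hv)
      · exact Or.inl (Or.inr ⟨y, hy, hv⟩)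
      · exact Or.inr ⟨x', hx', y, hy, hv⟩

lemma foldJ_mem (f g : Nat → List Int) (js : List Nat) (cur : PySem.Set Int) (v : Int) :
    v ∈ js.foldl
        (fun s j => (f j).foldl (fun s x => (g j).foldl (fun s y => addCombos s x y) s) s)
        cur ↔ v ∈ cur ∨ ∃ j ∈ js, PairHit (f j) (g j) v := by
  induction js generalizing cur with
  | nil => simp
  | cons j t ih =>
    simp only [List.foldl_cons, ih, foldX_mem, List.mem_cons]
    constructor
    · rintro ((hv | hv) | ⟨j', hj', hv⟩)
      · exact Or.inl hv
      · exact Or.inr ⟨j, Or.inl rfl, hv⟩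
      · exact Or.inr ⟨j', Or.inr hj', hv⟩
    · rintro (hv | ⟨j', rfl | hj', hv⟩)
      · exact Or.inl (Or.inl hv)
      · exact Or.inl (Or.inr hv)
      · exact Or.inr ⟨j', hj', hv⟩

lemma reachB_eq (N : Int) (i : Nat) :
    reachB N (i + 2) =
      (List.range' 1 (i + 1)).foldl
        (fun s j =>
          (reachB N j).foldl
            (fun s x => (reachB N (i + 2 - j)).foldl (fun s y => addCombos s x y) s) s)
        (PySem.Set.ofList [concatN N ((i : Int) + 2)]) := by
  rw [reachB]
  exact List.foldl_attach (l := List.range' 1 (i + 1))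
    (f := fun s j =>
      (reachB N j).foldl
        (fun s x => (reachB N (i + 2 - j)).foldl (fun s y => addCombos s x y) s) s)
    (b := PySem.Set.ofList [concatN N ((i : Int) + 2)])

lemma reach_mem (N : Int) (i : Nat) (v : Int) :
    v ∈ reachB N (i + 2) ↔ v = concatN N ((i : Int) + 2) ∨
      ∃ j : Nat, 1 ≤ j ∧ j < i + 2 ∧ PairHit (reachB N j) (reachB N (i + 2 - j)) v := by
  rw [reachB_eq, foldJ_mem, PySem.Set.mem_ofList]
  simp only [List.mem_singleton, List.mem_range'_1]
  constructor
  · rintro (hv | ⟨j, ⟨hj1, hj2⟩, hp⟩)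
    · exact Or.inl hv
    · exact Or.inr ⟨j, hj1, by omega, hp⟩
  · rintro (hv | ⟨j, hj1, hj2, hp⟩)
    · exact Or.inl hv
    · exact Or.inr ⟨j, ⟨hj1, by omega⟩, hp⟩

-- ---- the bridge: A's level j members = B's reach(j) ----
-- the mathematical hit predicate at level L+1 over a table of length L (A's half splits)
def Hit (tbl : List (List Int)) (v : Int) : Prop :=
  ∃ k : Nat, ∃ hk : k < (tbl.length + 1) / 2,
    PairHit (tbl[k]'(by omega)) (tbl[tbl.length - 1 - k]'(by omega)) v

lemma PairHit_congr {xs xs' ys ys' : List Int}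
    (hx : ∀ v : Int, v ∈ xs ↔ v ∈ xs') (hy : ∀ v : Int, v ∈ ys ↔ v ∈ ys') (v : Int) :
    PairHit xs ys v ↔ PairHit xs' ys' v := by
  unfold PairHit
  constructor
  · rintro ⟨x, hxm, y, hym, hv⟩; exact ⟨x, (hx x).mp hxm, y, (hy y).mp hym, hv⟩
  · rintro ⟨x, hxm, y, hym, hv⟩; exact ⟨x, (hx x).mpr hxm, y, (hy y).mpr hym, hv⟩

-- a full-split hit is already a half-split hit (by symmetry of the combo set)
lemma hit_of_full (temp : List (List Int)) (k : Nat) (hk : k < temp.length) (v : Int)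
    (hp : PairHit (temp[k]'hk) (temp[temp.length - 1 - k]'(by omega)) v) : Hit temp v := by
  by_cases hhalf : k < (temp.length + 1) / 2
  · exact ⟨k, hhalf, hp⟩
  · refine ⟨temp.length - 1 - k, by omega, ?_⟩
    rw [(PairHit_swap _ _ v)]
    simp only [show temp.length - 1 - (temp.length - 1 - k) = k from by omega]
    exact hp

lemma getD_idx (temp : List (List Int)) (k : Nat) (hk1 : k < temp.length) :
    PySem.List.pyGetD temp ((k : Int)) [] = temp[k] := by
  rw [PySem.List.pyGetD_natCast]
  exact List.getD_eq_getElem temp [] hk1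

lemma getD_idx_neg (temp : List (List Int)) (k : Nat) (hk2 : k + 1 ≤ temp.length) :
    PySem.List.pyGetD temp (-((k : Int) + 1)) [] = temp[temp.length - 1 - k]'(by omega) := by
  have e2 : (-((k : Int) + 1)) = -(((k + 1 : Nat) : Int)) := by push_cast; ring
  rw [e2, PySem.List.pyGetD_neg_natCast temp (k + 1) [] (by omega) hk2]
  simp only [show temp.length - (k + 1) = temp.length - 1 - k from by omega]

lemma ceil_half (L : Nat) :
    PySem.Int.floordiv ((L : Int) + 1) 2 = (((L + 1) / 2 : Nat) : Int) := by
  have h1 : ((L : Int) + 1) = ((L + 1 : Nat) : Int) := by push_cast; ring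
  have h2 : (2 : Int) = ((2 : Nat) : Int) := by norm_num
  rw [h1, h2, PySem.Int.floordiv_natCast]

lemma IHit_eq_Hit (temp : List (List Int)) (hL : 1 ≤ temp.length) (v : Int) :
    IHit temp (PySem.List.pyRange 0 (PySem.Int.floordiv (PySem.List.len temp + 1) 2) 1) v ↔
      Hit temp v := by
  rw [PySem.List.len_eq, ceil_half]
  unfold IHit Hit
  constructor
  · rintro ⟨i, hi, hp⟩
    rw [PySem.List.mem_pyRange_one] at hi
    obtain ⟨k, rfl⟩ : ∃ k : Nat, i = (k : Int) :=
      ⟨i.toNat, (Int.toNat_of_nonneg hi.1).symm⟩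
    have hk : k < (temp.length + 1) / 2 := by exact_mod_cast hi.2
    rw [getD_idx temp k (by omega), getD_idx_neg temp k (by omega)] at hp
    exact ⟨k, hk, hp⟩
  · rintro ⟨k, hk, hp⟩
    refine ⟨(k : Int), ?_, ?_⟩
    · rw [PySem.List.mem_pyRange_one]
      constructor
      · exact Int.natCast_nonneg k
      · exact_mod_cast hk
    · rw [getD_idx temp k (by omega), getD_idx_neg temp k (by omega)]
      exact hp

-- under the table invariant, B's reach(L+1) is exactly {concat} ∪ the level-(L+1) hits
lemma reach_level (N : Int) (temp : List (List Int)) (hL : 1 ≤ temp.length)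
    (hm : ∀ (k : Nat) (hk : k < temp.length) (v : Int),
      v ∈ temp[k]'hk ↔ v ∈ reachB N (k + 1)) (v : Int) :
    v ∈ reachB N (temp.length + 1) ↔
      v = concatN N ((temp.length : Int) + 1) ∨ Hit temp v := by
  have hL1 : temp.length + 1 = (temp.length - 1) + 2 := by omega
  rw [hL1, reach_mem]
  have ec : ((temp.length - 1 : Nat) : Int) + 2 = (temp.length : Int) + 1 := by omega
  rw [ec]
  simp only [show (temp.length - 1) + 2 = temp.length + 1 from by omega]
  constructor
  · rintro (hv | ⟨j, hj1, hj2, hp⟩)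
    · exact Or.inl hv
    · refine Or.inr ?_
      have hk : j - 1 < temp.length := by omega
      have hp' : PairHit (temp[j - 1]'hk)
          (temp[temp.length - 1 - (j - 1)]'(by omega)) v := by
        refine (PairHit_congr (fun w => ?_) (fun w => ?_) v).mpr hp
        · rw [hm (j - 1) hk w]
          simp only [show j - 1 + 1 = j from by omega]
        · rw [hm (temp.length - 1 - (j - 1)) (by omega) w]
          simp only [show temp.length - 1 - (j - 1) + 1 = temp.length + 1 - j from by omega]
      exact hit_of_full temp (j - 1) hk v hp'
  · rintro (hv | ⟨k, hk, hp⟩)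
    · exact Or.inl hv
    · have hkL : k < (temp.length + 1) / 2 := hk
      refine Or.inr ⟨k + 1, by omega, by omega, ?_⟩
      refine (PairHit_congr (fun w => ?_) (fun w => ?_) v).mp hp
      · rw [hm k (by omega) w]
      · rw [hm (temp.length - 1 - k) (by omega) w]
        simp only [show temp.length - 1 - k + 1 = temp.length + 1 - (k + 1) from by omega]

-- ---- main loop simulation ----
lemma mainLoop (N number : Int) (js : List Int) :
    ∀ (temp : List (List Int)),
      js = PySem.List.pyRange ((temp.length : Int) + 1) 9 1 →
      1 ≤ temp.length → temp.length ≤ 8 →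
      (∀ (k : Nat) (hk : k < temp.length) (v : Int),
        v ∈ temp[k]'hk ↔ v ∈ reachB N (k + 1)) →
      (∀ (k : Nat) (hk : k < temp.length), number ∉ temp[k]'hk) →
      loopJ N number js temp =
        scanAlt N number (List.range' (temp.length + 1) (8 - temp.length)) := by
  induction js with
  | nil =>
    intro temp hjs hL hU _ _
    have h9 : 9 ≤ (temp.length : Int) + 1 := by
      by_contra hge
      rw [PySem.List.pyRange_one_cons (by omega)] at hjs
      simp at hjs
    have : temp.length = 8 := by omega
    rw [this]
    simp [loopJ, scanAlt]
  | cons j t ih =>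
    intro temp hjs hL hU hm hnum
    have hlt : (temp.length : Int) + 1 < 9 := by
      by_contra hge
      rw [PySem.List.pyRange_one_eq_nil (by omega)] at hjs
      simp at hjs
    rw [PySem.List.pyRange_one_cons (by omega)] at hjs
    obtain ⟨hj, ht⟩ := List.cons.inj hjs
    subst hj
    have hU7 : temp.length ≤ 7 := by omega
    have h8 : 8 - temp.length = (7 - temp.length) + 1 := by omega
    rw [h8, List.range'_succ]
    have hreach := reach_level N temp hL hm
    unfold loopJ
    cases hA : loopI number temp
        (PySem.List.pyRange 0 (PySem.Int.floordiv (PySem.List.len temp + 1) 2) 1) [] with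
    | none =>
      dsimp only
      rw [loopI_none_iff, IHit_eq_Hit temp hL] at hA
      unfold scanAlt
      rw [if_pos (by rw [PySem.Set.contains_iff, hreach]; exact Or.inr hA)]
      push_cast
      ring
    | some r =>
      dsimp only
      have hnHit : ¬ Hit temp number := by
        intro hp
        rw [← IHit_eq_Hit temp hL, ← loopI_none_iff number temp _ [], hA] at hp
        exact absurd hp (by simp)
      have hrmem : ∀ v, v ∈ r ↔ Hit temp v := by
        intro v
        rw [loopI_some_mem number temp _ [] r hA v, IHit_eq_Hit temp hL]
        simp
      by_cases hcn : concatN N ((temp.length : Int) + 1) = number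
      · rw [if_pos hcn]
        unfold scanAlt
        rw [if_pos (by rw [PySem.Set.contains_iff, hreach]; exact Or.inl hcn.symm)]
        push_cast
        ring
      · rw [if_neg hcn]
        unfold scanAlt
        rw [if_neg (by
          rw [PySem.Set.contains_iff, hreach]
          rintro (hp | hp)
          · exact hcn hp.symm
          · exact hnHit hp)]
        have hlen1 : (temp ++ [r ++ [concatN N ((temp.length : Int) + 1)]]).length =
            temp.length + 1 := by simp
        have hrec := ih (temp ++ [r ++ [concatN N ((temp.length : Int) + 1)]])
          (by
            rw [hlen1, show ((temp.length + 1 : Nat) : Int) + 1 =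
              (temp.length : Int) + 1 + 1 from by push_cast; ring]
            exact ht)
          (by rw [hlen1]; omega)
          (by rw [hlen1]; omega)
          (by
            intro k hk v
            rw [hlen1] at hk
            by_cases hkL : k < temp.length
            · rw [List.getElem_append_left hkL]
              exact hm k hkL v
            · have hkeq : k = temp.length := by omega
              subst hkeq
              rw [List.getElem_concat_length]
              simp only [List.mem_append, List.mem_singleton, hrmem v]
              rw [hreach v]
              tauto
              rfl)
          (by
            intro k hk
            rw [hlen1] at hk
            by_cases hkL : k < temp.length
            · rw [List.getElem_append_left hkL]
              exact hnum k hkL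
            · have hkeq : k = temp.length := by omega
              subst hkeq
              rw [List.getElem_concat_length]
              simp only [List.mem_append, List.mem_singleton, hrmem number]
              rintro (hp | hp)
              · exact hnHit hp
              · exact hcn hp.symm
              rfl)
        rw [hrec, hlen1]
        simp only [show 8 - (temp.length + 1) = 7 - temp.length from by omega]

-- ===== VERDICT (by name: the statement is the Claim_ definition above) =====
theorem solution_spec : Claim_equal_solution := by
  intro N number _ _
  unfold Spec_solution solution solution_alt
  have hrange : List.range' 1 8 = 1 :: List.range' 2 7 := rfl
  rw [hrange]
  by_cases hNn : N = number
  · rw [if_pos hNn]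
    unfold scanAlt
    rw [if_pos (by
      rw [PySem.Set.contains_iff]
      show number ∈ reachB N 1
      rw [show reachB N 1 = PySem.Set.ofList [N] from by rw [reachB],
        PySem.Set.mem_ofList]
      simp [hNn])]
    norm_num
  · rw [if_neg hNn]
    unfold scanAlt
    rw [if_neg (by
      rw [PySem.Set.contains_iff]
      show number ∉ reachB N 1
      rw [show reachB N 1 = PySem.Set.ofList [N] from by rw [reachB],
        PySem.Set.mem_ofList]
      simp
      exact fun h => hNn h.symm)]
    have := mainLoop N number (PySem.List.pyRange 2 9 1) [[N]]
      (by norm_num)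
      (by norm_num)
      (by norm_num)
      (by
        intro k hk v
        have : k = 0 := by simpa using hk
        subst this
        rw [show reachB N 1 = PySem.Set.ofList [N] from by rw [reachB],
          PySem.Set.mem_ofList]
        simp)
      (by
        intro k hk
        have : k = 0 := by simpa using hk
        subst this
        simp
        exact fun h => hNn h.symm)
    rw [this]
    norm_num
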